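-- pv_equiv track=rewrite | github.com/RajkumarYadav777/DSAlgo | STRINGS/EVEN_ODD_FREQ/forloop.py | dict_comprehension
-- ===== SOURCE A (Python) =====
-- def dict_comprehension(st):
--     freq = {}
--     for ch in st:
--         freq[ch] = freq.get(ch, 0)+1
--
--     result = {
--         'even':{key:val for key, val in freq.items() if val%2==0},
--         'odd' :{key:val for key, val in freq.items() if val%2}
--     }
--     return result
-- ===== SOURCE B (Python) =====
-- def dict_comprehension(st):
--     # Recursive remove-all partition: take the first remaining character, count it by
--     # how much filtering it out shrinks the list, recurse on the filtered rest, and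
--     # prepend the pair to the even or odd side while unwinding. No frequency dict.
--     def go(chars):
--         if not chars:
--             return [], []
--         c = chars[0]
--         rest = [x for x in chars if x != c]
--         n = len(chars) - len(rest)
--         even, odd = go(rest)
--         if n % 2:
--             return even, [(c, n)] + odd
--         return [(c, n)] + even, odd
--     even, odd = go(list(st))
--     return {'even': dict(even), 'odd': dict(odd)}
-- ===== Notes on version B (the rewrite author's own statement) =====
-- stated objective: alternative
-- what changed: A builds a frequency dict in one pass and then runs two filtered dict comprehensions over its items; B uses no frequency dict at all: a remove-all recursion takes the first remaining character, obtains its count as the length drop caused by filtering it out, recurses on the filtered rest, and prepends the pair to the even or odd side while unwinding.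
import Mathlib
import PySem

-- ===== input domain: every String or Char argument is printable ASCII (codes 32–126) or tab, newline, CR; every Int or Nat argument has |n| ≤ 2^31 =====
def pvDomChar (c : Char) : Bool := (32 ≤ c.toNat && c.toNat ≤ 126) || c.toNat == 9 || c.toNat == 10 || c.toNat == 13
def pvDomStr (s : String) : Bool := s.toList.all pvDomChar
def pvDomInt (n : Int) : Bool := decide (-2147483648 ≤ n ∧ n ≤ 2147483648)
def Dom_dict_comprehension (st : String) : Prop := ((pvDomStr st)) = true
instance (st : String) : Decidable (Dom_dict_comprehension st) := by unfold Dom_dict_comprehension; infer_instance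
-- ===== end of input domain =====

-- B replaces A's frequency dict + two filtered comprehensions by a recursive remove-all
-- partition (count the head character by how much filtering it out shrinks the list,
-- recurse on the rest, prepend while unwinding); alternative decomposition, same results.

-- ===== PORT A =====
-- iterating a Python str yields its characters as 1-char strings
def dict_comprehension (st : String) : List (String × List (String × Int)) :=
  let chars : List String := st.toList.map (fun ch => String.singleton ch)
  let freq : PySem.Dict String Int :=
    chars.foldl (fun d ch => d.insert ch (d.getD ch 0 + 1)) PySem.Dict.empty
  [("even", freq.items.filter (fun kv => PySem.Int.mod kv.2 2 == 0)),
   ("odd",  freq.items.filter (fun kv => !(PySem.Int.mod kv.2 2 == 0)))]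

-- ===== PORT B =====
-- go(chars): remove-all recursion from Source B
def dictCompGo : List String → List (String × Int) × List (String × Int)
  | [] => ([], [])
  | c :: t =>
    let rest := (c :: t).filter (fun x => x != c)
    let n : Int := ((c :: t).length : Int) - (rest.length : Int)
    let p := dictCompGo rest
    if !(PySem.Int.mod n 2 == 0) then (p.1, (c, n) :: p.2)
    else ((c, n) :: p.1, p.2)
termination_by l => l.length
decreasing_by
  simp only [List.filter_cons, bne_self_eq_false, List.length_cons]
  exact Nat.lt_succ_of_le (List.length_filter_le _ _)

def dict_comprehension_alt (st : String) : List (String × List (String × Int)) :=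
  let chars : List String := st.toList.map (fun ch => String.singleton ch)
  let p := dictCompGo chars
  [("even", (PySem.Dict.ofList p.1).items), ("odd", (PySem.Dict.ofList p.2).items)]

-- ===== PRECONDITION & SPEC =====
def Spec_dict_comprehension (st : String) (out : List (String × List (String × Int))) : Prop := out = dict_comprehension_alt st
instance (st : String) (out : List (String × List (String × Int))) : Decidable (Spec_dict_comprehension st out) := by unfold Spec_dict_comprehension; infer_instance

-- ===== CLAIM =====
def Claim_equal_dict_comprehension : Prop := ∀ (st : String), Dom_dict_comprehension st → Spec_dict_comprehension st (dict_comprehension st)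

-- ===== LEMMAS AND PROOFS =====

-- dedup commutes with filter (first occurrences are preserved by filtering)
theorem ofList_filter_comm {α : Type} [DecidableEq α] (q : α → Bool) (t : List α) :
    (PySem.Set.ofList t).filter q = PySem.Set.ofList (t.filter q) := by
  induction t with
  | nil => rfl
  | cons x xs ih =>
      by_cases hq : q x = true
      · rw [show (x :: xs).filter q = x :: xs.filter q from by simp [hq],
            PySem.Set.ofList_cons, PySem.Set.ofList_cons, ← ih, PySem.Set.discard,
            PySem.Set.discard, List.filter_cons]
        simp only [hq, List.filter_filter, if_true]
        congr 1
        apply List.filter_congr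
        intro y _
        rw [Bool.and_comm]
      · rw [show (x :: xs).filter q = xs.filter q from by simp [hq],
            PySem.Set.ofList_cons, ← ih, PySem.Set.discard, List.filter_cons]
        simp only [hq, Bool.false_eq_true, if_false, List.filter_filter]
        apply List.filter_congr
        intro y _
        by_cases hyx : y = x
        · subst hyx; simp [hq]
        · simp [hyx]

-- the head's multiplicity is the length removed by filtering it out
theorem count_eq_length_sub_filter {α : Type} [DecidableEq α] (c : α) (l : List α) :
    (l.count c : Int) = (l.length : Int) - ((l.filter (fun x => x != c)).length : Int) := by
  have h1 : (l.filter (fun x => x != c)).length = l.countP (fun x => x != c) :=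
    List.countP_eq_length_filter.symm
  have h2 : l.countP (fun x => x != c) + l.countP (fun x => x == c) = l.length := by
    rw [List.length_eq_countP_add_countP (p := fun x => x != c)]
    congr 1
    apply List.countP_congr
    intro y _
    simp [bne]
  have h3 : l.count c = l.countP (fun x => x == c) := List.count_eq_countP
  omega

-- counts survive the remove-all filter for the remaining elements
theorem count_filter_ne {α : Type} [DecidableEq α] (c k : α) (l : List α) (hk : k ≠ c) :
    (l.filter (fun x => x != c)).count k = l.count k := by
  rw [List.count_filter]
  simp [hk]

-- the parity partition B should compute, as a function of the list
def goSpec (l : List String) : List (String × Int) × List (String × Int) :=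
  (((PySem.Set.ofList l).filter (fun k => PySem.Int.mod (l.count k : Int) 2 == 0)).map
      (fun k => (k, (l.count k : Int))),
   ((PySem.Set.ofList l).filter (fun k => !(PySem.Int.mod (l.count k : Int) 2 == 0))).map
      (fun k => (k, (l.count k : Int))))

-- one step of the remove-all recursion preserves the partition characterisation
theorem dictCompGo_cons (c : String) (t : List String)
    (ihr : dictCompGo (t.filter (fun x => x != c)) = goSpec (t.filter (fun x => x != c))) :
    dictCompGo (c :: t) = goSpec (c :: t) := by
  rw [dictCompGo]
  have hrest : (c :: t).filter (fun x => x != c) = t.filter (fun x => x != c) := by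
    simp
  have hn : (((c :: t).length : Int) - ((t.filter (fun x => x != c)).length : Int))
      = ((c :: t).count c : Int) := by
    rw [count_eq_length_sub_filter c (c :: t), hrest]
  -- the dedup of c :: t is c followed by the dedup of the filtered rest
  have hded : PySem.Set.ofList (c :: t)
      = c :: PySem.Set.ofList (t.filter (fun x => x != c)) := by
    rw [PySem.Set.ofList_cons, ← ofList_filter_comm, PySem.Set.discard]
    rfl
  -- counts in c :: t agree with counts in rest on members of the filtered dedup
  have hcnt : ∀ k ∈ PySem.Set.ofList (t.filter (fun x => x != c)),
      ((c :: t).count k : Int) = ((t.filter (fun x => x != c)).count k : Int) := by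
    intro k hkmem
    have hk : k ≠ c := by
      have h1 := (PySem.Set.mem_ofList _ _).mp hkmem
      have h2 := (List.mem_filter.mp h1).2
      simpa using h2
    rw [count_filter_ne c k t hk, List.count_cons_of_ne (Ne.symm hk)]
  simp only [hrest, hn, ihr, goSpec, hded]
  set rest := t.filter (fun x => x != c) with hrdef
  have hfe : ∀ (pr : Int → Bool),
      ((c :: PySem.Set.ofList rest).filter (fun k => pr ((c :: t).count k : Int))).map
          (fun k => (k, ((c :: t).count k : Int)))
      = (if pr ((c :: t).count c : Int) then [(c, ((c :: t).count c : Int))] else [])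
        ++ (((PySem.Set.ofList rest).filter (fun k => pr ((rest.count k : Int)))).map
            (fun k => (k, (rest.count k : Int)))) := by
    intro pr
    rw [List.filter_cons]
    by_cases hp : pr ((c :: t).count c : Int) = true
    · rw [if_pos hp, if_pos hp, List.map_cons, List.singleton_append]
      congr 1
      rw [List.filter_congr (fun k hk => by rw [hcnt k hk])]
      exact List.map_congr_left (fun k hk => by
        rw [hcnt k (List.mem_filter.mp hk).1])
    · rw [if_neg hp, if_neg hp, List.nil_append]
      rw [List.filter_congr (fun k hk => by rw [hcnt k hk])]
      exact List.map_congr_left (fun k hk => by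
        rw [hcnt k (List.mem_filter.mp hk).1])
  by_cases hpar : (PySem.Int.mod ((c :: t).count c : Int) 2 == 0) = true
  · rw [hpar]
    simp only [Bool.not_true, Bool.false_eq_true, if_false]
    refine Prod.ext ?_ ?_ <;> simp only
    · rw [hfe (fun v => PySem.Int.mod v 2 == 0), if_pos hpar, List.singleton_append]
    · rw [hfe (fun v => !(PySem.Int.mod v 2 == 0)),
          if_neg (by simp only [hpar, Bool.not_true]; exact Bool.false_ne_true), List.nil_append]
  · have hpf : (PySem.Int.mod ((c :: t).count c : Int) 2 == 0) = false :=
      Bool.not_eq_true _ ▸ (Bool.eq_false_iff.mpr (fun h => hpar h))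
    rw [hpf]
    simp only [Bool.not_false, if_true]
    refine Prod.ext ?_ ?_ <;> simp only
    · rw [hfe (fun v => PySem.Int.mod v 2 == 0), if_neg hpar, List.nil_append]
    · rw [hfe (fun v => !(PySem.Int.mod v 2 == 0)),
          if_pos (by simp only [hpf, Bool.not_false]), List.singleton_append]

-- go computes the parity partition of the deduplicated list paired with counts
theorem dictCompGo_spec (l : List String) : dictCompGo l = goSpec l := by
  induction l using dictCompGo.induct with
  | case1 => rw [dictCompGo]; rfl
  | case2 c t rest n hpar ih =>
      have ih' : dictCompGo ((c :: t).filter (fun x => x != c))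
          = goSpec ((c :: t).filter (fun x => x != c)) := ih
      exact dictCompGo_cons c t (by simpa [List.filter_cons] using ih')
  | case3 c t rest n hpar ih =>
      have ih' : dictCompGo ((c :: t).filter (fun x => x != c))
          = goSpec ((c :: t).filter (fun x => x != c)) := ih
      exact dictCompGo_cons c t (by simpa [List.filter_cons] using ih')

-- dict() of an association list with distinct keys keeps it as-is
theorem items_ofList_of_nodup (l : List (String × Int)) (h : (l.map Prod.fst).Nodup) :
    (PySem.Dict.ofList l).items = l := by
  have := PySem.Dict.items_foldl_insert_fresh (d := (PySem.Dict.empty : PySem.Dict String Int))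
    (l := l) (k := Prod.fst) (v := Prod.snd) (fun a _ => rfl) h
  simpa [PySem.Dict.ofList, PySem.Dict.update] using this

-- filtering a map by a predicate on the value is mapping the filtered keys
theorem filter_map_snd (ks : List String) (f : String → Int) (pr : Int → Bool) :
    ((ks.map (fun k => (k, f k))).filter (fun kv => pr kv.2))
      = (ks.filter (fun k => pr (f k))).map (fun k => (k, f k)) := by
  rw [List.filter_map]
  rfl

-- ===== VERDICT =====
theorem dict_comprehension_spec : Claim_equal_dict_comprehension := by
  intro st _
  unfold Spec_dict_comprehension
  simp only [dict_comprehension, dict_comprehension_alt]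
  rw [PySem.Dict.foldl_insert_getD_add_one_eq_counter, PySem.Dict.items_counter]
  simp only [dictCompGo_spec, goSpec]
  set chars := st.toList.map (fun ch => String.singleton ch) with hc
  have hkeys : ∀ (pr : Int → Bool),
      ((((PySem.Set.ofList chars).filter (fun k => pr ((chars.count k : Int)))).map
          (fun k => (k, (chars.count k : Int)))).map Prod.fst).Nodup := by
    intro pr
    rw [List.map_map]
    exact ((PySem.Set.nodup_ofList chars).filter _).map (by
      intro a b hab; simpa using hab)
  rw [filter_map_snd (PySem.Set.ofList chars) (fun k => ((chars.count k : Int)))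
        (fun v => PySem.Int.mod v 2 == 0),
      filter_map_snd (PySem.Set.ofList chars) (fun k => ((chars.count k : Int)))
        (fun v => !(PySem.Int.mod v 2 == 0)),
      items_ofList_of_nodup _ (hkeys (fun v => PySem.Int.mod v 2 == 0)),
      items_ofList_of_nodup _ (hkeys (fun v => !(PySem.Int.mod v 2 == 0)))]
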